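-- pv_equiv track=rewrite | github.com/durden2/pylamarck | pylamarck/logging.py | min_up_to_element
-- ===== SOURCE A (Python) =====
-- def min_up_to_element(l):
--     ret = [l[0]]
--     mval = l[0]
--     for i in range(1, len(l)):
--         if l[i] < mval:
--             mval = l[i]
--         ret.append(mval)
--     return ret
-- ===== SOURCE B (Python) =====
-- def min_up_to_element(l):
--     # brute force: the i-th output is min of the prefix l[:i+1], recomputed per index
--     return [min(l[: i + 1]) for i in range(len(l))]
-- ===== Notes on version B (the rewrite author's own statement) =====
-- stated objective: alternative
-- what changed: Replaces A's single pass carrying a running minimum by a naive per-index recomputation: the i-th output is min(l[:i+1]) computed from scratch on the prefix slice.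
-- crash fix: On the empty list A raises IndexError (it indexes l[0]); B's comprehension over range(0) naturally returns []. — e.g. on min_up_to_element([]): A raises IndexError, B returns []
import Mathlib
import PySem

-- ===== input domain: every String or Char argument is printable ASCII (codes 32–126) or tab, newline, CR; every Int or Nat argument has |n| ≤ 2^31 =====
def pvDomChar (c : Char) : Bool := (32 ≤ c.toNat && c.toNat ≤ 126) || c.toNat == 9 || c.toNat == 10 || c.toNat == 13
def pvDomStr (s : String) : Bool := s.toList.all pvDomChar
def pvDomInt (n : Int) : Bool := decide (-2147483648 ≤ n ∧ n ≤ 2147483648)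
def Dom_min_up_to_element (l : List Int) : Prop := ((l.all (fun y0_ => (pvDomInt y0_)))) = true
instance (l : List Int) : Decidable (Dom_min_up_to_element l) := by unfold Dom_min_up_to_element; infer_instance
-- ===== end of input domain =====

-- B recomputes min(l[:i+1]) from scratch for each index (naive quadratic prefix-min)
-- instead of A's single pass carrying a running minimum; alternative decomposition, not faster.

-- ===== PORT A =====
-- ret = [l[0]]; mval = l[0]; for i in range(1, len(l)): if l[i] < mval: mval = l[i]; ret.append(mval)
def min_up_to_element (l : List Int) : List Int :=
  match PySem.List.pyGet? l 0 with
  | none => []  -- indexing l[0] raises IndexError here; excluded by Pre_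
  | some h =>
    ((PySem.List.pyRange 1 (l.length : Int) 1).foldl
      (fun (p : List Int × Int) i =>
        let x := PySem.List.pyGetD l i 0  -- index always in range here
        let m := if x < p.2 then x else p.2
        (p.1 ++ [m], m)) ([h], h)).1

-- ===== PORT B =====
-- [min(l[:i+1]) for i in range(len(l))] — min over a nonempty slice (i ≥ 0), so min never raises;
-- the .getD 0 default is unreachable.
def min_up_to_element_alt (l : List Int) : List Int :=
  (PySem.List.pyRange 0 (l.length : Int) 1).map (fun i =>
    (PySem.List.min? (PySem.List.slice l none (some (i + 1))) (fun x => x)).getD 0)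

-- ===== PRECONDITION & SPEC =====
-- A raises IndexError (l[0]) on the empty list; Pre_ excludes exactly that input.
def Pre_min_up_to_element (l : List Int) : Prop := l ≠ []
instance (l : List Int) : Decidable (Pre_min_up_to_element l) := by unfold Pre_min_up_to_element; infer_instance
def pvWitness_min_up_to_element : List Int := [3, 1, 2]

-- On the empty list A raises IndexError while B's comprehension naturally returns [].
def Raises_min_up_to_element (l : List Int) : Prop := l = []
instance (l : List Int) : Decidable (Raises_min_up_to_element l) := by unfold Raises_min_up_to_element; infer_instance
def pvRaiseWitness_min_up_to_element : List Int := []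
def pvRaiseWitnessOut_min_up_to_element : List Int := []

def Spec_min_up_to_element (l : List Int) (out : List Int) : Prop := out = min_up_to_element_alt l
instance (l : List Int) (out : List Int) : Decidable (Spec_min_up_to_element l out) := by unfold Spec_min_up_to_element; infer_instance

-- ===== CLAIM (what is proved, stated in full; the proofs are below) =====
def Claim_equal_min_up_to_element : Prop := ∀ (l : List Int), Dom_min_up_to_element l → Pre_min_up_to_element l → Spec_min_up_to_element l (min_up_to_element l)
def Claim_raises_min_up_to_element : Prop := (∀ (l : List Int), Dom_min_up_to_element l → Raises_min_up_to_element l → ¬ Pre_min_up_to_element l) ∧ (Dom_min_up_to_element (pvRaiseWitness_min_up_to_element) ∧ Raises_min_up_to_element (pvRaiseWitness_min_up_to_element) ∧ min_up_to_element_alt (pvRaiseWitness_min_up_to_element) = pvRaiseWitnessOut_min_up_to_element)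

-- ===== LEMMAS AND PROOFS =====

-- scanl always re-emits its seed in front.
lemma pv_scanl_head (b : Int) (l : List Int) :
    List.scanl min b l = b :: (List.scanl min b l).tail := by
  cases l <;> simp [List.scanl]

-- A's fold appends exactly the tail of the min-scan from its carried minimum m.
lemma pv_loop_eq (t : List Int) (acc : List Int) (m : Int) :
    (t.foldl (fun (p : List Int × Int) x =>
        let v := if x < p.2 then x else p.2; (p.1 ++ [v], v)) (acc, m)).1
    = acc ++ (List.scanl min m t).tail := by
  induction t generalizing acc m with
  | nil => simp [List.scanl]
  | cons x xs ih =>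
    simp only [List.foldl_cons]
    have hv : (if x < m then x else m) = min m x := by
      rw [min_def]; split_ifs <;> omega
    show (xs.foldl _ (acc ++ [if x < m then x else m], if x < m then x else m)).1 = _
    rw [hv, ih, List.scanl_cons, List.tail_cons]
    conv_rhs => rw [pv_scanl_head (min m x) xs]
    simp

-- the min-scan is the list of prefix minima.
lemma pv_scanl_eq_prefix_mins (t : List Int) (h : Int) :
    List.scanl min h t
      = (List.range (t.length + 1)).map (fun k => (t.take k).foldl min h) := by
  induction t generalizing h with
  | nil => simp [List.scanl]
  | cons x xs ih =>
    rw [List.scanl_cons, List.length_cons, List.range_succ_eq_map]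
    simp only [List.map_cons, List.take_zero, List.foldl_nil, List.map_map]
    congr 1
    rw [ih (min h x)]
    apply List.map_congr_left
    intro k _
    simp [List.foldl_cons]

-- B evaluates, elementwise, to the prefix-min fold.
lemma pv_alt_eq (h : Int) (t : List Int) :
    min_up_to_element_alt (h :: t)
      = (List.range (t.length + 1)).map (fun k => (t.take k).foldl min h) := by
  unfold min_up_to_element_alt
  rw [show ((h :: t).length : Int) = ((t.length + 1 : Nat) : Int) by simp,
      PySem.List.pyRange_zero_nat]
  rw [List.map_map]
  apply List.map_congr_left
  intro k hk
  simp only [Function.comp]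
  rw [show ((k : Int) + 1) = ((k + 1 : Nat) : Int) by push_cast; ring,
      PySem.List.slice_to_natCast]
  rw [List.take_succ_cons, PySem.List.min?_id_cons]
  simp

-- ===== VERDICT (by name: the statement is the Claim_ definition above) =====
theorem min_up_to_element_spec : Claim_equal_min_up_to_element := by
  intro l _ hpre
  unfold Spec_min_up_to_element
  cases l with
  | nil => exact absurd rfl hpre
  | cons h t =>
    unfold min_up_to_element
    simp only [PySem.List.pyGet?_zero, List.getElem?_cons_zero]
    rw [PySem.List.foldl_pyRange_pyGetD' (h :: t) 0
      (fun (p : List Int × Int) x =>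
        (p.1 ++ [if x < p.2 then x else p.2], if x < p.2 then x else p.2))
      ([h], h) (a := 1) (by omega)]
    rw [show ((1 : Int).toNat) = 1 from rfl]
    simp only [List.drop_succ_cons, List.drop_zero]
    rw [pv_loop_eq t [h] h, pv_alt_eq, ← pv_scanl_eq_prefix_mins]
    conv_rhs => rw [pv_scanl_head h t]
    simp

@[simp] theorem min_up_to_element_raises : Claim_raises_min_up_to_element := by
  unfold Claim_raises_min_up_to_element
  exact ⟨fun l _ hr hp => hp hr, by decide⟩
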